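-- pv_equiv track=rewrite | github.com/jiyeon2536/algorithm | 프로그래머스/0/181932. 코드 처리하기/코드 처리하기.py | solution
-- ===== SOURCE A (Python) =====
-- def solution(code):
--     mode = False
--     ret = ''
--     for i in range(len(code)):
--         if code[i] == '1':
--             mode = not mode
--         elif (not mode) and (not i % 2):
--             ret += code[i]
--         elif mode and i % 2:
--             ret += code[i]
--     if ret == '':
--         return 'EMPTY'
--     return ret
-- ===== SOURCE B (Python) =====
-- def solution(code):
--     # Segment the code at the toggle chars '1'; inside the j-th segment exactly j
--     # toggles have happened, so the kept characters are a stride-2 slice of the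
--     # segment starting at the first position whose global parity matches j's.
--     def go(s, pos, ones):
--         cut = s.find('1')
--         if cut == -1:
--             return s[(ones - pos) % 2 :: 2]
--         return s[:cut][(ones - pos) % 2 :: 2] + go(s[cut + 1:], pos + cut + 1, ones + 1)
--
--     return go(code, 0, 0) or 'EMPTY'
-- ===== Notes on version B (the rewrite author's own statement) =====
-- stated objective: alternative
-- what changed: Replaces A's per-character loop with a mutable toggle flag by recursion on the toggle-delimited segments: find the next toggle char with str.find, emit a stride-2 slice of the segment whose start is chosen from the segment's toggle-count/offset parity, and recurse on the remainder.
import Mathlib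
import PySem

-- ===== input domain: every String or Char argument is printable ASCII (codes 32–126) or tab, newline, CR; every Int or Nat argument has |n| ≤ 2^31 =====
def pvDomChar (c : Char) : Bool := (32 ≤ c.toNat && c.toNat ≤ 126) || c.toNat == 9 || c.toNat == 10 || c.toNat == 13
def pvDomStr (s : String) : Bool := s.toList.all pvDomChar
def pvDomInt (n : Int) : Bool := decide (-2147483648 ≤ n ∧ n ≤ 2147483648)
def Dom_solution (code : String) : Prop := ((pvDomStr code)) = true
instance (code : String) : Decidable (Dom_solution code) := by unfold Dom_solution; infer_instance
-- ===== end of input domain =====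

-- B replaces A's per-character toggle loop by recursion on the '1'-delimited segments,
-- keeping a stride-2 slice of each segment (same O(n); bulk find/slice steps measured faster than A's per-char loop).

-- ===== PORT A =====
-- A's loop body, factored out under a name (same code): given state (mode, ret), the index i
-- and the character code[i].
def pvStepA (st : Bool × List Char) (i : Int) (c : Char) : Bool × List Char :=
  if c = '1' then (!st.1, st.2)
  else if !st.1 && (PySem.Int.mod i 2 == 0) then (st.1, st.2 ++ [c])
  else if st.1 && (PySem.Int.mod i 2 != 0) then (st.1, st.2 ++ [c])
  else st

-- A: one loop over range(len(code)) carrying (mode, ret); code[i] is always in range,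
-- so pyGetD with a dummy default is exact here.
def solution (code : String) : String :=
  let cs := code.toList
  let st := (PySem.List.pyRange 0 (cs.length : Int) 1).foldl
    (fun st (i : Int) => pvStepA st i (PySem.List.pyGetD cs i ' ')) (false, ([] : List Char))
  if st.2 = [] then "EMPTY" else String.ofList st.2

-- ===== PORT B =====
-- Source B's inner `go(s, pos, ones)`: find the next '1'; if none, return s[(ones-pos)%2::2];
-- else return s[:cut][(ones-pos)%2::2] + go(s[cut+1:], pos+cut+1, ones+1).
-- The `if h :` form only names the guard for termination; the computation is Source B's.
def pvGoB (s : List Char) (pos ones : Int) : List Char :=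
  if h : PySem.Chars.find s ['1'] = -1 then
    (PySem.List.slice? s (some (PySem.Int.mod (ones - pos) 2)) none 2).getD []
  else
    (PySem.List.slice? (PySem.List.slice s none (some (PySem.Chars.find s ['1'])))
        (some (PySem.Int.mod (ones - pos) 2)) none 2).getD []
      ++ pvGoB (PySem.List.slice s (some (PySem.Chars.find s ['1'] + 1)) none)
           (pos + PySem.Chars.find s ['1'] + 1) (ones + 1)
termination_by s.length
decreasing_by
  have h0 : -1 ≤ PySem.Chars.find s ['1'] := PySem.Chars.neg_one_le_find s ['1']
  have h1 : ['1'] <:+: s := (PySem.Chars.find_ne_neg_one_iff s ['1']).mp h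
  have h2 : 1 ≤ s.length := by simpa using h1.sublist.length_le
  rw [PySem.List.slice_from _ (by omega)]
  simp only [List.length_drop]
  omega

def solution_alt (code : String) : String :=
  let r := pvGoB code.toList 0 0
  if r = [] then "EMPTY" else String.ofList r

-- ===== PRECONDITION & SPEC =====
def Spec_solution (code : String) (out : String) : Prop := out = solution_alt code
instance (code : String) (out : String) : Decidable (Spec_solution code out) := by unfold Spec_solution; infer_instance

-- ===== CLAIM (what is proved, stated in full; the proofs are below) =====
def Claim_equal_solution : Prop := ∀ (code : String), Dom_solution code → Spec_solution code (solution code)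

-- ===== LEMMAS AND PROOFS =====

/-- final mode of A's loop -/
def pvFm : List Char → Bool → Bool
  | [], m => m
  | c :: cs, m => pvFm cs (if c = '1' then !m else m)

/-- common spec: characters kept, scanning from index `s` with mode `m` -/
def pvKeep : List Char → Int → Bool → List Char
  | [], _, _ => []
  | c :: cs, s, m =>
    if c = '1' then pvKeep cs (s + 1) (!m)
    else (if m == decide (PySem.Int.mod s 2 = 1) then [c] else []) ++ pvKeep cs (s + 1) m

lemma pvMod2 (s : Int) : PySem.Int.mod s 2 = 0 ∨ PySem.Int.mod s 2 = 1 := by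
  rw [PySem.Int.mod_eq_emod_of_pos (by norm_num : (0:Int) < 2)]
  omega

lemma pvStepA_eq (m : Bool) (r : List Char) (s : Int) (c : Char) :
    pvStepA (m, r) s c
      = (if c = '1' then !m else m,
         r ++ (if c = '1' then []
               else if m == decide (PySem.Int.mod s 2 = 1) then [c] else [])) := by
  rcases pvMod2 s with h | h <;> by_cases hc : c = '1' <;> cases m <;>
    simp [pvStepA, hc] <;> split <;> simp

lemma pvAcore (cs : List Char) : ∀ (s : Int) (m : Bool) (r : List Char),
    (PySem.List.enumerate cs s).foldl (fun st p => pvStepA st p.1 p.2) (m, r)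
      = (pvFm cs m, r ++ pvKeep cs s m) := by
  induction cs with
  | nil => intro s m r; simp [PySem.List.enumerate_nil, pvFm, pvKeep]
  | cons c cs ih =>
    intro s m r
    rw [PySem.List.enumerate_cons, List.foldl_cons]
    show (PySem.List.enumerate cs (s+1)).foldl (fun st p => pvStepA st p.1 p.2)
        (pvStepA (m, r) s c) = _
    rw [pvStepA_eq m r s c, ih (s + 1)]
    by_cases hc : c = '1' <;> simp [pvFm, pvKeep, hc]

/-- every other element, starting with the first -/
def pvEvery2 {α : Type} : List α → List α
  | [] => []
  | [a] => [a]
  | a :: _ :: t => a :: pvEvery2 t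

lemma pvEvery2_cons {α : Type} (c : α) (t : List α) :
    pvEvery2 (c :: t) = c :: pvEvery2 (t.drop 1) := by
  cases t <;> simp [pvEvery2]

lemma pvFilterRange {α : Type} (ys : List α) :
    (List.range ((ys.length + 1) / 2)).filterMap (fun k => ys[2 * k]?) = pvEvery2 ys := by
  induction ys using pvEvery2.induct with
  | case1 => simp [pvEvery2]
  | case2 a => simp [pvEvery2, List.range_succ]
  | case3 a b t ih =>
    have hlen : ((a :: b :: t).length + 1) / 2 = (t.length + 1) / 2 + 1 := by
      simp only [List.length_cons]; omega
    rw [hlen, List.range_succ_eq_map]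
    simp only [List.filterMap_cons, Nat.mul_zero, List.getElem?_cons_zero,
      List.filterMap_map, Function.comp_def, Nat.succ_eq_add_one]
    have hidx : ∀ k : ℕ, (a :: b :: t)[2 * (k + 1)]? = t[2 * k]? := by
      intro k
      have h2 : 2 * (k + 1) = 2 * k + 2 := by omega
      simp [h2]
    simp only [hidx]
    simp [pvEvery2, ih]

/-- `xs[t::2]` is every other element of `xs.drop t`. -/
lemma pvSlice2 {α : Type} (xs : List α) (t : ℕ) :
    PySem.List.slice? xs (some (t : Int)) none 2 = some (pvEvery2 (xs.drop t)) := by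
  simp only [PySem.List.slice?, PySem.List.sliceIndices]
  norm_num
  simp only [show ¬ ((t : Int) < 0) from by omega, if_false]
  by_cases h : (t : Int) < (xs.length : Int)
  · rw [show min (t : Int) (xs.length : Int) = (t : Int) from by omega, if_pos h]
    have htle : t ≤ xs.length := by omega
    have hcast : ((xs.length : Int) - t + 2 - 1) = ((xs.length - t + 1 : ℕ) : Int) := by
      push_cast [Nat.cast_sub htle]; ring
    have hcount : (((xs.length : Int) - t + 2 - 1) / 2).toNat = ((xs.drop t).length + 1) / 2 := by
      rw [hcast, show ((2:Int) = ((2:ℕ) : Int)) from rfl, ← Int.natCast_div, Int.toNat_natCast,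
        List.length_drop]
    rw [hcount, ← pvFilterRange (xs.drop t)]
    congr 1
    funext k
    have hidx : ((t : Int) + 2 * (k : Int)).toNat = t + 2 * k := by omega
    rw [hidx, List.getElem?_drop]
  · rw [show min (t : Int) (xs.length : Int) = (xs.length : Int) from by omega,
      if_neg (by omega)]
    rw [List.drop_of_length_le (by omega)]
    simp [pvEvery2]

lemma pvSingletonInfix (c : Char) (s : List Char) : [c] <:+: s ↔ c ∈ s := by
  constructor
  · intro h; exact h.sublist.subset (by simp)
  · intro h
    obtain ⟨u, v, huv⟩ := List.append_of_mem h
    exact ⟨u, v, by simp [huv]⟩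

lemma pvParityFlip (x : Int) :
    decide (PySem.Int.mod (x + 1) 2 = 1) = ! decide (PySem.Int.mod x 2 = 1) := by
  rw [PySem.Int.mod_eq_emod_of_pos (by norm_num : (0:Int) < 2),
      PySem.Int.mod_eq_emod_of_pos (by norm_num : (0:Int) < 2)]
  rcases Int.emod_two_eq x with h | h
  · have h1 : (x + 1) % 2 = 1 := by omega
    rw [h, h1]; simp
  · have h1 : (x + 1) % 2 = 0 := by omega
    rw [h, h1]; simp

lemma pvStartParity (pos ones : Int) (m : Bool) (hm : m = decide (PySem.Int.mod ones 2 = 1)) :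
    PySem.Int.mod (ones - pos) 2
      = (if m == decide (PySem.Int.mod pos 2 = 1) then (0 : Int) else 1) := by
  subst hm
  rw [PySem.Int.mod_eq_emod_of_pos (by norm_num : (0:Int) < 2),
      PySem.Int.mod_eq_emod_of_pos (by norm_num : (0:Int) < 2),
      PySem.Int.mod_eq_emod_of_pos (by norm_num : (0:Int) < 2)]
  rcases Int.emod_two_eq pos with h1 | h1 <;> rcases Int.emod_two_eq ones with h2 | h2 <;>
    rw [h1, h2] <;> simp <;> omega

/-- on a '1'-free list, pvKeep is a stride-2 slice -/
lemma pvKeep_no_one (a : List Char) : ∀ (pos : Int) (m : Bool), '1' ∉ a →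
    pvKeep a pos m
      = pvEvery2 (a.drop (if m == decide (PySem.Int.mod pos 2 = 1) then 0 else 1)) := by
  induction a with
  | nil => intro pos m _; split <;> simp [pvKeep, pvEvery2]
  | cons c a ih =>
    intro pos m hmem
    simp only [List.mem_cons, not_or] at hmem
    have hc : ¬ c = '1' := fun h => hmem.1 (by simp [h])
    rw [show pvKeep (c :: a) pos m
          = (if m == decide (PySem.Int.mod pos 2 = 1) then [c] else [])
              ++ pvKeep a (pos + 1) m from by simp [pvKeep, hc],
        ih (pos + 1) m hmem.2, pvParityFlip pos]
    generalize decide (PySem.Int.mod pos 2 = 1) = q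
    cases q <;> cases m <;> simp [pvEvery2_cons]

lemma pvKeep_append (a : List Char) : ∀ (b : List Char) (pos : Int) (m : Bool), '1' ∉ a →
    pvKeep (a ++ '1' :: b) pos m
      = pvKeep a pos m ++ pvKeep b (pos + a.length + 1) (!m) := by
  induction a with
  | nil => intro b pos m _; simp [pvKeep]
  | cons c a ih =>
    intro b pos m hmem
    simp only [List.mem_cons, not_or] at hmem
    have hc : ¬ c = '1' := fun h => hmem.1 (by simp [h])
    have harith : pos + 1 + (a.length : Int) + 1 = pos + ((a.length : Int) + 1) + 1 := by ring
    simp only [List.cons_append, pvKeep, if_neg hc, ih b (pos + 1) m hmem.2,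
      List.length_cons]
    push_cast
    rw [harith]
    simp [List.append_assoc]

/-- B's recursion computes the common spec. -/
lemma pvGoB_eq (n : ℕ) : ∀ (s : List Char), s.length ≤ n → ∀ (pos ones : Int),
    pvGoB s pos ones = pvKeep s pos (decide (PySem.Int.mod ones 2 = 1)) := by
  induction n with
  | zero =>
    intro s hs pos ones
    have : s = [] := List.eq_nil_of_length_eq_zero (by omega)
    subst this
    have hf : PySem.Chars.find [] ['1'] = -1 := by decide
    rw [pvGoB, dif_pos hf]
    rcases pvMod2 (ones - pos) with h | h
    · rw [h, show (0:Int) = ((0:ℕ):Int) from rfl, pvSlice2]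
      simp [pvKeep, pvEvery2]
    · rw [h, show (1:Int) = ((1:ℕ):Int) from rfl, pvSlice2]
      simp [pvKeep, pvEvery2]
  | succ n ih =>
    intro s hs pos ones
    set m := decide (PySem.Int.mod ones 2 = 1) with hm
    by_cases hf : PySem.Chars.find s ['1'] = -1
    · -- no '1' in s
      have hmem : '1' ∉ s := by
        have := (PySem.Chars.find_eq_neg_one_iff s ['1']).mp hf
        exact fun hc => this ((pvSingletonInfix '1' s).mpr hc)
      rw [pvGoB, dif_pos hf, pvKeep_no_one s pos m hmem, pvStartParity pos ones m hm]
      generalize (m == decide (PySem.Int.mod pos 2 = 1)) = q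
      cases q
      · rw [if_neg (by simp), if_neg (by simp),
          show (1:Int) = ((1:ℕ):Int) from rfl, pvSlice2]
        simp
      · rw [if_pos rfl, if_pos rfl, show (0:Int) = ((0:ℕ):Int) from rfl, pvSlice2]
        simp
    · -- s = take k ++ '1' :: drop (k+1) at the first '1'
      have h0 : -1 ≤ PySem.Chars.find s ['1'] := PySem.Chars.neg_one_le_find s ['1']
      have hcut0 : 0 ≤ PySem.Chars.find s ['1'] := by omega
      set cut := PySem.Chars.find s ['1'] with hcutdef
      set k := cut.toNat with hk
      have hkc : (k : Int) = cut := Int.toNat_of_nonneg hcut0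
      have hspec := PySem.Chars.findFrom_natCast_spec s ['1'] 0 (by omega)
        (by simp only [Nat.cast_zero, PySem.Chars.findFrom_zero]; exact hf)
      simp only [Nat.cast_zero, PySem.Chars.findFrom_zero] at hspec
      rw [← hcutdef] at hspec
      obtain ⟨-, hpre, hmin⟩ := hspec
      obtain ⟨t, ht⟩ := hpre
      have hdropk : s.drop k = '1' :: t := by simpa using ht.symm
      have hklen : k < s.length := by
        by_contra hge
        rw [List.drop_of_length_le (by omega)] at hdropk
        simp at hdropk
      have htdrop : t = s.drop (k + 1) := by
        have h' := congrArg List.tail hdropk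
        rw [List.tail_drop] at h'
        simpa using h'.symm
      have hmemtake : '1' ∉ s.take k := by
        intro hmem
        obtain ⟨i, hi, hgi⟩ := List.getElem_of_mem hmem
        rw [List.length_take] at hi
        have hik : i < k := by omega
        have hil : i < s.length := by omega
        rw [List.getElem_take] at hgi
        refine hmin i (Nat.zero_le i) hik ?_
        have hdec : s.drop i = s[i] :: s.drop (i + 1) := List.drop_eq_getElem_cons hil
        exact ⟨s.drop (i + 1), by rw [hdec, hgi]; rfl⟩
      have hsplit : s = s.take k ++ '1' :: s.drop (k + 1) := by
        conv_lhs => rw [← List.take_append_drop k s]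
        rw [hdropk, htdrop]
      rw [pvGoB, dif_neg hf]
      rw [← hcutdef]
      have hslice1 : PySem.List.slice s none (some cut) = s.take k := by
        rw [PySem.List.slice_to s hcut0]
      have hslice2 : PySem.List.slice s (some (cut + 1)) none = s.drop (k + 1) := by
        rw [PySem.List.slice_from s (show (0:Int) ≤ cut + 1 from by omega)]
        congr 1
        omega
      rw [hslice1, hslice2]
      have hlen2 : (s.drop (k + 1)).length ≤ n := by
        rw [List.length_drop]; omega
      rw [ih (s.drop (k + 1)) hlen2 (pos + cut + 1) (ones + 1)]
      conv_rhs => rw [hsplit]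
      rw [pvKeep_append (s.take k) (s.drop (k + 1)) pos m hmemtake]
      congr 1
      · rw [pvKeep_no_one (s.take k) pos m hmemtake, pvStartParity pos ones m hm]
        generalize (m == decide (PySem.Int.mod pos 2 = 1)) = q
        cases q
        · rw [if_neg (by simp), if_neg (by simp),
            show (1:Int) = ((1:ℕ):Int) from rfl, pvSlice2]
          simp
        · rw [if_pos rfl, if_pos rfl, show (0:Int) = ((0:ℕ):Int) from rfl, pvSlice2]
          simp
      · have hlentake : ((s.take k).length : Int) = (k : Int) := by
          rw [List.length_take]; exact_mod_cast by omega
        rw [hlentake, hkc, pvParityFlip ones, hm]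

-- ===== VERDICT (by name: the statement is the Claim_ definition above) =====
theorem solution_spec : Claim_equal_solution := by
  intro code _
  show solution code = solution_alt code
  simp only [solution, solution_alt]
  have hA := pvAcore code.toList 0 false []
  rw [PySem.List.enumerate_eq_map_pyRange code.toList ' ', List.foldl_map] at hA
  simp only [PySem.List.len_eq] at hA ⊢
  rw [hA]
  rw [pvGoB_eq code.toList.length code.toList (le_refl _) 0 0]
  norm_num [show PySem.Int.mod 0 2 = 0 from by decide]
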